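-- pv_equiv track=rewrite | github.com/tuananhbui89/COMPRESSION | range_coding.py | map_symbol2decimal
-- ===== SOURCE A (Python) =====
-- def map_symbol2decimal(symbols, maxrange=256):
-- 	value = 0
-- 	size = len(symbols)
--
-- 	for s in range(size):
-- 		symbol = symbols[s]
-- 		scale = maxrange**(size-s-1)
-- 		value = value + symbol * scale
--
-- 	return int(value)
-- ===== SOURCE B (Python) =====
-- def map_symbol2decimal(symbols, maxrange=256):
--     value = 0
--     for symbol in symbols:
--         value = value * maxrange + symbol
--     return value
-- ===== Notes on version B (the rewrite author's own statement) =====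
-- stated objective: faster
-- what changed: Replaces the per-index power maxrange**(size-s-1) with Horner's rule (value = value*maxrange + symbol), removing all exponentiations.
import Mathlib
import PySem

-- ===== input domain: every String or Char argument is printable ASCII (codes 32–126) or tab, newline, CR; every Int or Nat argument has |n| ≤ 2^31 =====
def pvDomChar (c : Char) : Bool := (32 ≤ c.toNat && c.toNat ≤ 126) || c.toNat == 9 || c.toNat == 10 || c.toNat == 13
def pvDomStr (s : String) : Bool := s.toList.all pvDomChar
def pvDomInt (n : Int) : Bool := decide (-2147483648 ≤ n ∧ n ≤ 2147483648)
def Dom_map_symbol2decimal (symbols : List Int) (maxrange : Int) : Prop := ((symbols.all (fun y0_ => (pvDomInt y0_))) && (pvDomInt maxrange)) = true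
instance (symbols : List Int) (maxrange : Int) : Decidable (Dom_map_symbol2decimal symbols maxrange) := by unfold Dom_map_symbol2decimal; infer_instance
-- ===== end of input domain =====

-- B replaces per-index exponentiation maxrange**(size-s-1) with Horner's rule; objective: faster.


-- ===== PORT A =====
-- literal port of A: loop s over range(size), adding symbols[s] * maxrange**(size-s-1).
-- symbols[s] is ported as pyGetD (index always in range here, so exact); the exponent
-- size-s-1 is always ≥ 0, so Python's ** is ^ on the toNat of the exponent.
def map_symbol2decimal (symbols : List Int) (maxrange : Int) : Int :=
  (PySem.List.pyRange 0 (symbols.length : Int) 1).foldl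
    (fun value s =>
      let symbol := PySem.List.pyGetD symbols s 0
      let scale := maxrange ^ ((symbols.length : Int) - s - 1).toNat
      value + symbol * scale) 0

-- ===== PORT B =====
def map_symbol2decimal_alt (symbols : List Int) (maxrange : Int) : Int :=
  symbols.foldl (fun value symbol => value * maxrange + symbol) 0

-- ===== PRECONDITION & SPEC =====
def Spec_map_symbol2decimal (symbols : List Int) (maxrange : Int) (out : Int) : Prop := out = map_symbol2decimal_alt symbols maxrange
instance (symbols : List Int) (maxrange : Int) (out : Int) : Decidable (Spec_map_symbol2decimal symbols maxrange out) := by unfold Spec_map_symbol2decimal; infer_instance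

-- ===== CLAIM (what is proved, stated in full; the proofs are below) =====
def Claim_equal_map_symbol2decimal : Prop := ∀ (symbols : List Int) (maxrange : Int), Dom_map_symbol2decimal symbols maxrange → Spec_map_symbol2decimal symbols maxrange (map_symbol2decimal symbols maxrange)

-- ===== LEMMAS AND PROOFS =====

-- A's loop is 'acc + term', so it is the sum of the per-index terms.
lemma mapA_sum (symbols : List Int) (maxrange : Int) :
    map_symbol2decimal symbols maxrange =
      ((PySem.List.pyRange 0 (symbols.length : Int) 1).map
        (fun s => PySem.List.pyGetD symbols s 0 * maxrange ^ ((symbols.length : Int) - s - 1).toNat)).sum := by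
  unfold map_symbol2decimal
  rw [PySem.List.foldl_add]
  simp

-- Horner's fold grows at the right end: appending y multiplies and adds.
lemma horner_append (xs : List Int) (y m : Int) :
    map_symbol2decimal_alt (xs ++ [y]) m = map_symbol2decimal_alt xs m * m + y := by
  unfold map_symbol2decimal_alt
  rw [List.foldl_append]
  rfl

-- core equivalence, by reverse induction on the symbol list
lemma core (symbols : List Int) (maxrange : Int) :
    map_symbol2decimal symbols maxrange = map_symbol2decimal_alt symbols maxrange := by
  induction symbols using List.reverseRecOn with
  | nil => rfl
  | append_singleton ys y ih =>
    rw [mapA_sum] at ih ⊢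
    rw [horner_append, ← ih]
    have hlen : (((ys ++ [y]).length : Int)) = (ys.length : Int) + 1 := by
      simp
    rw [hlen, PySem.List.pyRange_one_succ_right (by positivity : (0:Int) ≤ (ys.length : Int))]
    rw [List.map_append, List.sum_append]
    have hlast :
        ((([(ys.length : Int)]).map
          (fun s => PySem.List.pyGetD (ys ++ [y]) s 0 * maxrange ^ (((ys.length : Int) + 1) - s - 1).toNat)).sum) = y := by
      simp only [List.map_cons, List.map_nil, List.sum_cons, List.sum_nil]
      rw [PySem.List.pyGetD_eq_getElem (ys ++ [y]) 0 (by positivity) (by simp)]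
      simp
    rw [hlast]
    have hpref :
        ((PySem.List.pyRange 0 (ys.length : Int) 1).map
          (fun s => PySem.List.pyGetD (ys ++ [y]) s 0 * maxrange ^ (((ys.length : Int) + 1) - s - 1).toNat))
        = ((PySem.List.pyRange 0 (ys.length : Int) 1).map
          (fun s => (PySem.List.pyGetD ys s 0 * maxrange ^ (((ys.length : Int)) - s - 1).toNat) * maxrange)) := by
      apply List.map_congr_left
      intro s hs
      rw [PySem.List.mem_pyRange_one] at hs
      obtain ⟨h0, h1⟩ := hs
      rw [PySem.List.pyGetD_eq_getElem (ys ++ [y]) 0 h0 (by simp; omega),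
          PySem.List.pyGetD_eq_getElem ys 0 h0 (by simpa using h1)]
      rw [List.getElem_append_left (by omega)]
      have he : (((ys.length : Int) + 1) - s - 1).toNat = ((ys.length : Int) - s - 1).toNat + 1 := by
        omega
      rw [he, pow_succ]
      ring
    rw [hpref, ← List.sum_map_mul_right]

-- ===== VERDICT (by name: the statement is the Claim_ definition above) =====
theorem map_symbol2decimal_spec : Claim_equal_map_symbol2decimal := by
  intro symbols maxrange _
  unfold Spec_map_symbol2decimal
  exact core symbols maxrange
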